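-- pv_equiv track=rewrite | github.com/Ashiq-am/Path-of-Python | 3.Data Types/Arrays Set 1 and Set 2/Prefix Sum/Check if a large number can be divided into two or more segments of equal sum/Check if a large number can be divided into two or more segments of equal sum.py | check
-- ===== SOURCE A (Python) =====
-- def check(s):
--     # length of string
--     n = len(s)
--
--     # array to store prefix sum
--     Presum = [0] * n
--
--     # ord() gives ASCII value
--     # first index
--     Presum[0] = ord(s[0]) - ord('0')
--
--     # calculate the prefix
--     for i in range(n):
--         Presum[i] = Presum[i - 1] + (ord(s[i]) - ord('0'))
--
--     # iterate for all number from second number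
--     for i in range(n):
--
--         # sum from 0th index to i-1th index
--         sum = Presum[i]
--         presum = 0
--         it = 1
--
--         # counter turns true when sum
--         # is obtained from a segment
--         flag = 0
--
--         # iterate till the last number
--         while (it < n):
--
--             # sum of segments
--             presum += ord(s[it]) - ord('0')
--
--             # if segment sum is equal
--             # to first segment
--             if presum == sum:
--                 presum = 0
--                 flag = 1
--
--             # when greater than not possible
--             elif presum > sum:
--                 break
--
--             it += 1
--
--         # if at the end all values are traversed
--         # and all segments have sum equal to first segment
--         # then it is possible
--         if presum == 0 and it == n and flag == 1:
--             return True
--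
--     return False
-- ===== SOURCE B (Python) =====
-- def _consume(d, t):
--     """Scan d, accumulating; ('seg', rest) once the running sum hits t exactly,
--     ('fail', None) if it overshoots t, ('end', acc) if d runs out."""
--     acc = 0
--     for i, x in enumerate(d):
--         acc += x
--         if acc == t:
--             return ('seg', d[i + 1:])
--         if acc > t:
--             return ('fail', None)
--     return ('end', acc)
--
--
-- def _segments(d, t):
--     """True iff d splits as at least one segment of sum exactly t followed by a
--     leftover whose running sum never reaches t and ends at 0."""
--     kind, rest = _consume(d, t)
--     if kind != 'seg':
--         return False
--     while True:
--         kind, nxt = _consume(rest, t)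
--         if kind == 'seg':
--             rest = nxt
--         elif kind == 'end':
--             return nxt == 0
--         else:
--             return False
--
--
-- def check(s):
--     digits = [ord(c) - 48 for c in s[1:]]
--     targets = set()
--     acc = 0
--     for c in s:
--         acc += ord(c) - 48
--         targets.add(acc)
--     return any(_segments(digits, t) for t in targets)
-- ===== Notes on version B (the rewrite author's own statement) =====
-- stated objective: alternative
-- what changed: A scans every start index, rebuilding segment sums with an index/flag while-loop over Presum; B collects the DISTINCT prefix-sum targets in a set and tests each once with a recursive segment-stripping function (consume one exact-sum segment, recurse on the rest), skipping duplicate targets.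
import Mathlib
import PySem

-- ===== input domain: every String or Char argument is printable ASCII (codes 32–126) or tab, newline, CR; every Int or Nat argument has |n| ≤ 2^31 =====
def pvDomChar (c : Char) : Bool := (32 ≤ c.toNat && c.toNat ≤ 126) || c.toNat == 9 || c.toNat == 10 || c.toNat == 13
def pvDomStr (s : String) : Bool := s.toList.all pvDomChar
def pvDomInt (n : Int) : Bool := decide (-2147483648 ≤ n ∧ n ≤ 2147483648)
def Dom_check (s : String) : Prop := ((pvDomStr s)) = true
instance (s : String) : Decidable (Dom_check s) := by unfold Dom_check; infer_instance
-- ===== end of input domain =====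

-- B replaces A's scan over every start index (with its repeated target sums) by one pass over the
-- DISTINCT prefix-sum targets and a recursive segment-stripping test; equivalence of the RETURN value
-- is proved for every nonempty string (A raises IndexError only on "").

-- ===== PORT A =====

-- ord(c) - ord('0')
def pvVal (c : Char) : Int := (c.toNat : Int) - 48

-- the two array-filling statements: Presum = [0]*n; Presum[0] = d0; for i in range(n): Presum[i] = Presum[i-1] + d_i
-- (Presum[i-1] at i = 0 is Python's negative index -1, i.e. the LAST cell)
def pvPresumA (ds : List Int) : List Int :=
  (List.range ds.length).foldl
    (fun pre (i : Nat) => PySem.List.pySetD pre (i : Int)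
        (PySem.List.pyGetD pre ((i : Int) - 1) 0 + ds.getD i 0))
    (PySem.List.pySetD (List.replicate ds.length 0) (0 : Int) (ds.getD 0 0))

-- the inner 'while (it < n)': walks the digits s[it], it = 1..n-1, carrying (presum, it, flag);
-- returns the final (presum, it, flag) — on 'break' it stops without incrementing it
def pvInnerA : List Int → Int → Int → Nat → Bool → (Int × Nat × Bool)
  | [], _, presum, it, flag => (presum, it, flag)
  | x :: r, t, presum, it, flag =>
    let p := presum + x
    if p = t then pvInnerA r t 0 (it + 1) true
    else if p > t then (p, it, flag)          -- break
    else pvInnerA r t p (it + 1) flag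

def check (s : String) : Bool :=
  let cs := s.toList
  let n := cs.length
  if n = 0 then false    -- Python: the subscript s[0] raises IndexError on the empty string (outside Pre_check)
  else
    let ds := cs.map pvVal
    let presum := pvPresumA ds
    -- for i in range(n): run the while over s[1:], return True on the first success
    (List.range n).any (fun i =>
      let t := PySem.List.pyGetD presum (i : Int) 0
      let res := pvInnerA ((cs.drop 1).map pvVal) t 0 1 false
      res.1 == 0 && res.2.1 == n && res.2.2)

-- ===== PORT B =====

-- result of Source B's _consume: ('seg', rest), ('fail', None), ('end', acc)
inductive PvConsume where
  | seg (rest : List Int)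
  | fail
  | stop (acc : Int)
deriving DecidableEq, Repr

-- _consume(d, t): scan, accumulating; segment completed / overshoot / list exhausted
def pvConsume (t : Int) : List Int → Int → PvConsume
  | [], acc => .stop acc
  | x :: r, acc =>
    let a := acc + x
    if a = t then .seg r
    else if a > t then .fail
    else pvConsume t r a

theorem pvConsume_seg_length (t : Int) : ∀ (d : List Int) (acc : Int) (r : List Int),
    pvConsume t d acc = .seg r → r.length < d.length := by
  intro d
  induction d with
  | nil => intro acc r h; simp [pvConsume] at h
  | cons x xs ih =>
    intro acc r h
    simp only [pvConsume] at h
    split_ifs at h with h1 h2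
    · injection h with he; subst he; simp
    · exact Nat.lt_trans (ih _ _ h) (by simp)

-- the 'while True' loop of _segments, after the first segment has been stripped
def pvRestOk (t : Int) (r : List Int) : Bool :=
  match h : pvConsume t r 0 with
  | .seg r2 => pvRestOk t r2
  | .stop a => a == 0
  | .fail => false
termination_by r.length
decreasing_by exact pvConsume_seg_length t r 0 _ h

-- _segments(d, t): the first _consume must complete a segment, then the while loop
def pvSegments (d : List Int) (t : Int) : Bool :=
  match pvConsume t d 0 with
  | .seg rest => pvRestOk t rest
  | _ => false

def check_alt (s : String) : Bool :=
  let digits := (s.toList.drop 1).map pvVal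
  let targets := (s.toList.foldl
      (fun (p : Int × PySem.Set Int) c =>
        let a := p.1 + pvVal c
        (a, PySem.Set.add p.2 a))
      ((0 : Int), (PySem.Set.empty : PySem.Set Int))).2
  -- any(...) over a set: order-independent
  targets.any (fun t => pvSegments digits t)

-- ===== PRECONDITION & SPEC =====
-- Pre_check excludes only the empty string, on which A raises IndexError at the first subscript s[0].
def Pre_check (s : String) : Prop := s ≠ ""
instance (s : String) : Decidable (Pre_check s) := by unfold Pre_check; infer_instance
def pvWitness_check : String := "73452"

def Spec_check (s : String) (out : Bool) : Prop := out = check_alt s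
instance (s : String) (out : Bool) : Decidable (Spec_check s out) := by unfold Spec_check; infer_instance

-- ===== CLAIM (what is proved, stated in full; the proofs are below) =====
def Claim_equal_check : Prop := ∀ (s : String), Dom_check s → Pre_check s → Spec_check s (check s)

-- ===== LEMMAS AND PROOFS =====

-- running prefix sums of ds starting from acc (the values S_1, …, S_n)
def pvPre (ds : List Int) (acc : Int) : List Int :=
  match ds with
  | [] => []
  | x :: r => (acc + x) :: pvPre r (acc + x)

theorem pvPre_length (ds : List Int) (acc : Int) : (pvPre ds acc).length = ds.length := by
  induction ds generalizing acc with
  | nil => rfl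
  | cons x r ih => simp [pvPre, ih]

-- (c) the targets set built by B's loop holds exactly the prefix sums
theorem pvTargets_mem (cs : List Char) : ∀ (acc : Int) (st : PySem.Set Int) (x : Int),
    x ∈ (cs.foldl (fun (p : Int × PySem.Set Int) c =>
        let a := p.1 + pvVal c
        (a, PySem.Set.add p.2 a)) (acc, st)).2
    ↔ x ∈ st ∨ x ∈ pvPre (cs.map pvVal) acc := by
  induction cs with
  | nil => intro acc st x; simp [pvPre]
  | cons c r ih =>
    intro acc st x
    simp only [List.foldl_cons, List.map_cons, pvPre]
    rw [ih]
    simp [PySem.Set.mem_add]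
    tauto

-- pvRestOk unfolded as a plain (non-dependent) match
theorem pvRestOk_eq (t : Int) (r : List Int) :
    pvRestOk t r = (match pvConsume t r 0 with
     | .seg r2 => pvRestOk t r2
     | .stop a => a == 0
     | .fail => false) := by
  conv_lhs => rw [pvRestOk.eq_def]
  split <;> rename_i h <;> rw [h]

theorem pvSegments_nil (t : Int) : pvSegments [] t = false := by
  simp [pvSegments, pvConsume]

-- (b) the while loop of A agrees with B's consume/rest recursion
theorem pvInner_eq (t : Int) (n : Nat) :
    ∀ (r : List Int) (acc : Int) (it : Nat) (flag : Bool), it + r.length = n →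
    (let res := pvInnerA r t acc it flag
     (res.1 == 0 && res.2.1 == n && res.2.2)) =
    (match pvConsume t r acc with
     | .seg rest => pvRestOk t rest
     | .stop a => (a == 0) && flag
     | .fail => false) := by
  intro r
  induction r with
  | nil =>
    intro acc it flag h
    simp at h
    simp [pvInnerA, pvConsume, h]
  | cons x xs ih =>
    intro acc it flag h
    simp only [pvInnerA, pvConsume]
    split_ifs with h1 h2
    · rw [ih 0 (it + 1) true (by simp at h ⊢; omega)]
      show (match pvConsume t xs 0 with
            | PvConsume.seg rest => pvRestOk t rest
            | PvConsume.stop a => a == 0 && true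
            | PvConsume.fail => false) = pvRestOk t xs
      rw [pvRestOk_eq t xs]
      cases pvConsume t xs 0 <;> simp
    · have hit : it ≠ n := by simp at h; omega
      simp [hit]
    · exact ih _ (it + 1) flag (by simp at h ⊢; omega)

theorem pvSegments_eq_inner (d : List Int) (t : Int) (n : Nat) (hn : 1 + d.length = n) :
    (let res := pvInnerA d t 0 1 false
     (res.1 == 0 && res.2.1 == n && res.2.2)) = pvSegments d t := by
  rw [pvInner_eq t n d 0 1 false hn]
  unfold pvSegments
  cases pvConsume t d 0 <;> simp

-- value of the k-th prefix sum
theorem pvPre_getD (ds : List Int) : ∀ (acc : Int) (k : Nat), k < ds.length →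
    (pvPre ds acc).getD k 0 = acc + (ds.take (k + 1)).sum := by
  induction ds with
  | nil => intro acc k hk; simp at hk
  | cons x r ih =>
    intro acc k hk
    cases k with
    | zero => simp [pvPre]
    | succ k =>
      rw [pvPre, List.getD_cons_succ, ih (acc + x) k (by simpa using hk),
        List.take_succ_cons, List.sum_cons]
      ring

theorem pvSum_take_succ (ds : List Int) (k : Nat) (hk : k < ds.length) :
    (ds.take (k + 1)).sum = (ds.take k).sum + ds.getD k 0 := by
  obtain ⟨v, hv⟩ : ∃ v, ds[k]? = some v := ⟨_, List.getElem?_eq_getElem hk⟩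
  rw [List.take_add_one, hv, List.sum_append, List.getD_eq_getElem?_getD, hv]
  simp

-- the freshly initialised Presum array: [0]*n with Presum[0] = d0
theorem pvBase_eq (ds : List Int) (h1 : 1 ≤ ds.length) :
    PySem.List.pySetD (List.replicate ds.length 0) (0 : Int) (ds.getD 0 0)
      = ds.getD 0 0 :: List.replicate (ds.length - 1) 0 := by
  have := PySem.List.pySetD_of_nonneg (xs := List.replicate ds.length 0)
      (i := (0 : Int)) (v := ds.getD 0 0) (by norm_num)
  rw [this]
  obtain ⟨m, hm⟩ : ∃ m, ds.length = m + 1 := ⟨ds.length - 1, by omega⟩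
  simp [hm, List.replicate_succ]

-- (a) the array-filling loop: invariant after k steps (n ≥ 2)
theorem pvPresum_loop (ds : List Int) (h2 : 2 ≤ ds.length) :
    ∀ k, k ≤ ds.length →
    (List.range k).foldl
      (fun pre (i : Nat) => PySem.List.pySetD pre (i : Int)
          (PySem.List.pyGetD pre ((i : Int) - 1) 0 + ds.getD i 0))
      (PySem.List.pySetD (List.replicate ds.length 0) (0 : Int) (ds.getD 0 0))
    = (pvPre ds 0).take k ++ (ds.getD 0 0 :: List.replicate (ds.length - 1) 0).drop k := by
  intro k
  induction k with
  | zero =>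
    intro _
    simp only [List.range_zero, List.foldl_nil, List.take_zero, List.drop_zero, List.nil_append]
    exact pvBase_eq ds (by omega)
  | succ k ih =>
    intro hk1
    have hkn : k < ds.length := by omega
    rw [List.range_succ, List.foldl_append, ih (by omega)]
    simp only [List.foldl_cons, List.foldl_nil]
    set P := pvPre ds 0 with hP
    set B := ds.getD 0 0 :: List.replicate (ds.length - 1) 0 with hB
    have hPlen : P.length = ds.length := by rw [hP, pvPre_length]
    have hBlen : B.length = ds.length := by rw [hB]; simp; omega
    have htklen : (P.take k).length = k := by simp [hPlen]; omega
    have hgetP : ∀ (j : Nat), j < ds.length →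
        (P.take k ++ B.drop k).getD j 0 = (if j < k then P.getD j 0 else B.getD j 0) := by
      intro j hj
      by_cases hjk : j < k
      · rw [if_pos hjk]
        rw [List.getD_append _ _ _ j (by omega)]
        rw [List.getD_eq_getElem?_getD, List.getElem?_take_of_lt hjk, ← List.getD_eq_getElem?_getD]
      · rw [if_neg hjk]
        rw [List.getD_append_right _ _ _ j (by omega)]
        rw [htklen, List.getD_eq_getElem?_getD, List.getElem?_drop]
        rw [show k + (j - k) = j by omega, ← List.getD_eq_getElem?_getD]
    -- the value written at position k is the k-th prefix sum
    have hval : PySem.List.pyGetD (P.take k ++ B.drop k) ((k : Int) - 1) 0 + ds.getD k 0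
        = P.getD k 0 := by
      rcases Nat.eq_zero_or_pos k with hk0 | hkpos
      · subst hk0
        have hA : (P.take 0 ++ B.drop 0) = B := by simp
        have hlast : PySem.List.pyGetD B ((0 : Int) - 1) 0 = 0 := by
          show PySem.List.pyGetD (ds.getD 0 0 :: List.replicate (ds.length - 1) 0) ((0 : Int) - 1) 0 = 0
          rw [show (0 : Int) - 1 = -1 by norm_num]
          rw [PySem.List.pyGetD_neg_ofNat _ 1 0 (by norm_num) (by simp)]
          rw [List.getElem_cons]
          split
          · rename_i hz
            exfalso
            simp at hz
            omega
          · simp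
        rw [hA]
        rw [show ((0 : Nat) : Int) = (0 : Int) by norm_num, hlast]
        rw [hP, pvPre_getD ds 0 0 (by omega)]
        rcases ds with _ | ⟨a, r⟩
        · simp at h2
        · simp
      · have hcast : ((k : Nat) : Int) - 1 = (((k - 1 : Nat)) : Int) := by omega
        rw [hcast, PySem.List.pyGetD_natCast]
        rw [hgetP (k - 1) (by omega), if_pos (by omega)]
        rw [hP, pvPre_getD ds 0 (k - 1) (by omega), pvPre_getD ds 0 k (by omega)]
        rw [show (k - 1) + 1 = k by omega, pvSum_take_succ ds k hkn]
        ring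
    rw [hval, PySem.List.pySetD_natCast]
    rw [List.set_append_right k _ (by omega)]
    rw [htklen, Nat.sub_self]
    rw [List.drop_eq_getElem_cons (l := B) (by omega : k < B.length), List.set_cons_zero]
    obtain ⟨v, hv⟩ : ∃ v, P[k]? = some v := ⟨_, List.getElem?_eq_getElem (by omega : k < P.length)⟩
    have hgd : P.getD k 0 = v := by rw [List.getD_eq_getElem?_getD, hv]; rfl
    rw [hgd, List.take_add_one, hv]
    simp

theorem pvPresumA_eq (ds : List Int) (h2 : 2 ≤ ds.length) : pvPresumA ds = pvPre ds 0 := by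
  unfold pvPresumA
  rw [pvPresum_loop ds h2 ds.length (le_refl _)]
  have htake : (pvPre ds 0).take ds.length = pvPre ds 0 :=
    List.take_of_length_le (by rw [pvPre_length])
  have hdrop : (ds.getD 0 0 :: List.replicate (ds.length - 1) 0).drop ds.length = [] := by
    apply List.drop_eq_nil_of_le
    simp
    omega
  rw [htake, hdrop, List.append_nil]

theorem check_eq_exists (s : String) (hs : s ≠ "") :
    check s = check_alt s := by
  have hcs : s.toList ≠ [] := fun h => hs (by
    simpa using congrArg String.ofList h)
  have hn1 : 1 ≤ s.toList.length := List.length_pos_iff.mpr hcs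
  have hsl : s.toList.length = s.length := by simp
  unfold check check_alt
  rw [Bool.eq_iff_iff]
  rw [if_neg (by omega : ¬ s.toList.length = 0)]
  simp only [List.any_eq_true, List.mem_range]
  have htail : 1 + ((s.toList.drop 1).map pvVal).length = s.toList.length := by
    simp; omega
  constructor
  · rintro ⟨i, hi, hbody⟩
    rw [pvSegments_eq_inner _ _ _ htail] at hbody
    refine ⟨PySem.List.pyGetD (pvPresumA (s.toList.map pvVal)) (i : Int) 0, ?_, hbody⟩
    rcases Nat.lt_or_ge 1 s.toList.length with h2 | h2
    · -- n ≥ 2 : Presum holds exactly the prefix sums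
      rw [pvTargets_mem]
      right
      rw [pvPresumA_eq _ (by simp; omega), PySem.List.pyGetD_natCast]
      have hlen : (pvPre (s.toList.map pvVal) 0).length = s.toList.length := by
        rw [pvPre_length]; simp
      obtain ⟨v, hv⟩ : ∃ v, (pvPre (s.toList.map pvVal) 0)[i]? = some v :=
        ⟨_, List.getElem?_eq_getElem (by omega : i < (pvPre (s.toList.map pvVal) 0).length)⟩
      rw [List.getD_eq_getElem?_getD, hv]
      exact List.mem_of_getElem? hv
    · -- n = 1 : the while loop never runs, the body is never true
      exfalso
      have hd : (s.toList.drop 1).map pvVal = [] := by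
        rw [List.drop_eq_nil_of_le (by omega : s.toList.length ≤ 1)]
        rfl
      rw [hd, pvSegments_nil] at hbody
      exact absurd hbody (by simp)
  · rintro ⟨t, hmem, hbody⟩
    rw [pvTargets_mem] at hmem
    rcases hmem with h | hmem
    · simp [PySem.Set.empty] at h
    rcases Nat.lt_or_ge 1 s.toList.length with h2 | h2
    · have hlen : (pvPre (s.toList.map pvVal) 0).length = s.toList.length := by
        rw [pvPre_length]; simp
      obtain ⟨i, hi, hti⟩ := List.mem_iff_getElem.mp hmem
      refine ⟨i, by omega, ?_⟩
      rw [pvSegments_eq_inner _ _ _ htail]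
      rw [pvPresumA_eq _ (by simp; omega), PySem.List.pyGetD_natCast]
      rw [List.getD_eq_getElem?_getD, List.getElem?_eq_getElem hi]
      simpa [hti] using hbody
    · exfalso
      have hd : (s.toList.drop 1).map pvVal = [] := by
        rw [List.drop_eq_nil_of_le (by omega : s.toList.length ≤ 1)]
        rfl
      rw [hd, pvSegments_nil] at hbody
      exact absurd hbody (by simp)

-- ===== VERDICT (by name: the statement is the Claim_ definition above) =====
theorem check_spec : Claim_equal_check := by
  intro s _ hpre
  unfold Spec_check
  exact check_eq_exists s hpre
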